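-- pv_equiv track=rewrite | github.com/xiangfeiye/PN-design | Td/utils.py | get_smiles_ring
-- ===== SOURCE A (Python) =====
-- def get_smiles_ring(split_smiles):
--     current = 0
--     smiles_list = split_smiles
--     number_list = ['0', '1', '2', '3', '4', '5', '6', '7', '8', '9']
--     index_stack = []
--     flag_stack = []
--     rings_indexs = []
--
--     for i, char in enumerate(smiles_list):
--         if i < current:
--             continue
--         if i < len(smiles_list)-1 and smiles_list[i+1] == ']':
--             continue
--
--         flag = None
--         if char == "%":
--             ring_index = [i, i+1, i+2]
--             flag = smiles_list[i:i+3]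
--             current = i+3
--         elif char in number_list:
--             ring_index = [i]
--             flag = smiles_list[i:i+1]
--             current = i+1
--         else:
--             current = i+1
--
--         if flag is not None:
--             if flag in flag_stack:
--                 tmp = flag_stack.index(flag)
--                 index = index_stack[tmp]
--                 rings_indexs.append(list(index)+list(ring_index))
--
--                 flag_stack = flag_stack[:tmp] + flag_stack[tmp+1:]
--                 index_stack = index_stack[:tmp] + index_stack[tmp+1:]
--             else:
--                 flag_stack.append(flag)
--                 index_stack.append(ring_index)
--         rings_indexs.sort()
--     return rings_indexs
-- ===== SOURCE B (Python) =====
-- def get_smiles_ring(split_smiles):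
--     # Pass 1: tokenize -- collect (flag, ring_index) ring-closure tokens with the
--     # same skip-pointer rules as the original scanner.
--     number_list = ['0', '1', '2', '3', '4', '5', '6', '7', '8', '9']
--     n = len(split_smiles)
--     tokens = []
--     current = 0
--     for i in range(n):
--         if i < current:
--             continue
--         if i < n - 1 and split_smiles[i + 1] == ']':
--             continue
--         ch = split_smiles[i]
--         if ch == "%":
--             tokens.append((tuple(split_smiles[i:i + 3]), [i, i + 1, i + 2]))
--             current = i + 3
--         elif ch in number_list:
--             tokens.append((tuple(split_smiles[i:i + 1]), [i]))
--             current = i + 1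
--         else:
--             current = i + 1
--     # Pass 2: group the occurrences of each flag, in order.
--     groups = {}
--     for flag, ring in tokens:
--         groups.setdefault(flag, []).append(ring)
--     # Pass 3: pair consecutive occurrences within each group; one final sort.
--     pairs = []
--     for occ in groups.values():
--         for k in range(1, len(occ), 2):
--             pairs.append(occ[k - 1] + occ[k])
--     pairs.sort()
--     return pairs
-- ===== Notes on version B (the rewrite author's own statement) =====
-- stated objective: alternative
-- what changed: Replaces the running flag/index stacks (linear search + slice-deletion per matched token, and a re-sort of the accumulated result on every iteration) by a three-pass pipeline: tokenize once, group occurrences per flag in a dict, pair consecutive occurrences within each group, and sort the result once at the end.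
import Mathlib
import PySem

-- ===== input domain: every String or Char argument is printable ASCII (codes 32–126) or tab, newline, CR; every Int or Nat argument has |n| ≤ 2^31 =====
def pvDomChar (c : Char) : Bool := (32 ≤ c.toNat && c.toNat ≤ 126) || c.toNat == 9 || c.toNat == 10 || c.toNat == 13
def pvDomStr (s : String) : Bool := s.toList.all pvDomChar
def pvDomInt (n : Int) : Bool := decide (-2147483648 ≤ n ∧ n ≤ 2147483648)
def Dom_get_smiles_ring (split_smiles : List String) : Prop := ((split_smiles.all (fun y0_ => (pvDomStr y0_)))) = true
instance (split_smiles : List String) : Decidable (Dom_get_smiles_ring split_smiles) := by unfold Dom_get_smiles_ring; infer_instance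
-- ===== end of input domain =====

-- B replaces A's running flag/index stacks (linear search + slice-deletion per token, and a
-- re-sort of the result on every iteration) by a different decomposition: tokenize /
-- group-by-flag / pair-consecutive / one final sort.

-- ===== PORT A =====
def numberList : List String := ["0", "1", "2", "3", "4", "5", "6", "7", "8", "9"]

-- A's `if flag is not None:` stack-update block, on (index_stack, flag_stack, rings_indexs)
def stackUpd (s : List (List Int) × List (List String) × List (List Int))
    (flag : List String) (ring_index : List Int) :
    List (List Int) × List (List String) × List (List Int) :=
  if flag ∈ s.2.1 then
    let tmp : Nat := (PySem.List.index? s.2.1 flag).getD 0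
    let index := PySem.List.pyGetD s.1 (tmp : Int) []
    (PySem.List.slice s.1 none (some (tmp : Int)) ++ PySem.List.slice s.1 (some ((tmp : Int) + 1)) none,
     PySem.List.slice s.2.1 none (some (tmp : Int)) ++ PySem.List.slice s.2.1 (some ((tmp : Int) + 1)) none,
     s.2.2 ++ [index ++ ring_index])
  else
    (s.1 ++ [ring_index], s.2.1 ++ [flag], s.2.2)

-- one iteration of A's loop; state = (current, index_stack, flag_stack, rings_indexs)
def stepA (smiles : List String)
    (st : Int × List (List Int) × List (List String) × List (List Int)) (ic : Int × String) :
    Int × List (List Int) × List (List String) × List (List Int) :=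
  if ic.1 < st.1 then st
  else if ic.1 < PySem.List.len smiles - 1 ∧ PySem.List.pyGetD smiles (ic.1 + 1) "" = "]" then st
  else if ic.2 = "%" then
    let s := stackUpd (st.2.1, st.2.2.1, st.2.2.2)
      (PySem.List.slice smiles (some ic.1) (some (ic.1 + 3))) [ic.1, ic.1 + 1, ic.1 + 2]
    (ic.1 + 3, s.1, s.2.1, PySem.List.sorted s.2.2 (fun x => x))
  else if ic.2 ∈ numberList then
    let s := stackUpd (st.2.1, st.2.2.1, st.2.2.2)
      (PySem.List.slice smiles (some ic.1) (some (ic.1 + 1))) [ic.1]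
    (ic.1 + 1, s.1, s.2.1, PySem.List.sorted s.2.2 (fun x => x))
  else
    (ic.1 + 1, st.2.1, st.2.2.1, PySem.List.sorted st.2.2.2 (fun x => x))

def get_smiles_ring (split_smiles : List String) : List (List Int) :=
  ((PySem.List.enumerate split_smiles 0).foldl (stepA split_smiles) (0, [], [], [])).2.2.2

-- ===== PORT B =====
def numberListB : List String := ["0", "1", "2", "3", "4", "5", "6", "7", "8", "9"]

-- one iteration of B's tokenizing loop; state = (current, tokens)
def stepTok (smiles : List String)
    (st : Int × List (List String × List Int)) (i : Int) :
    Int × List (List String × List Int) :=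
  if i < st.1 then st
  else if i < PySem.List.len smiles - 1 ∧ PySem.List.pyGetD smiles (i + 1) "" = "]" then st
  else if PySem.List.pyGetD smiles i "" = "%" then
    (i + 3, st.2 ++ [(PySem.List.slice smiles (some i) (some (i + 3)), [i, i + 1, i + 2])])
  else if PySem.List.pyGetD smiles i "" ∈ numberListB then
    (i + 1, st.2 ++ [(PySem.List.slice smiles (some i) (some (i + 1)), [i])])
  else (i + 1, st.2)

def get_smiles_ring_alt (split_smiles : List String) : List (List Int) :=
  let tokens := ((PySem.List.pyRange 0 (PySem.List.len split_smiles) 1).foldl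
    (stepTok split_smiles) (0, [])).2
  let groups := tokens.foldl
    (fun d p => d.modify p.1 [] (fun cur => cur ++ [p.2])) PySem.Dict.empty
  let pairs := groups.values.foldl
    (fun acc occ => (PySem.List.pyRange 1 (PySem.List.len occ) 2).foldl
      (fun acc k => acc ++ [PySem.List.pyGetD occ (k - 1) [] ++ PySem.List.pyGetD occ k []]) acc) []
  PySem.List.sorted pairs (fun x => x)

-- ===== PRECONDITION & SPEC =====
def Spec_get_smiles_ring (split_smiles : List String) (out : List (List Int)) : Prop := out = get_smiles_ring_alt split_smiles
instance (split_smiles : List String) (out : List (List Int)) : Decidable (Spec_get_smiles_ring split_smiles out) := by unfold Spec_get_smiles_ring; infer_instance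

-- ===== CLAIM (what is proved, stated in full; the proofs are below) =====
def Claim_equal_get_smiles_ring : Prop := ∀ (split_smiles : List String), Dom_get_smiles_ring split_smiles → Spec_get_smiles_ring split_smiles (get_smiles_ring split_smiles)

-- ===== LEMMAS AND PROOFS =====

-- sorted (with the default instances on List Int) of a permutation is the same list
theorem sortedII_perm (xs ys : List (List Int)) (h : xs.Perm ys) :
    PySem.List.sorted xs (fun x => x) = PySem.List.sorted ys (fun x => x) := by
  have h2 := PySem.List.sorted_eq_sorted_of_perm xs ys (fun x => x) (fun _ _ h => h) h
  convert h2 using 2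

theorem sortedII_sorted (xs : List (List Int)) :
    PySem.List.sorted (PySem.List.sorted xs (fun x => x)) (fun x => x)
      = PySem.List.sorted xs (fun x => x) := by
  have h2 := PySem.List.sorted_sorted (κ := List Int) xs (fun x => x)
  convert h2 using 2
  congr 1

-- proof-side: A's handling of a single ring token, as a fold step over tokens
def pairStep (s : List (List Int) × List (List String) × List (List Int))
    (t : List String × List Int) : List (List Int) × List (List String) × List (List Int) :=
  ((stackUpd s t.1 t.2).1, (stackUpd s t.1 t.2).2.1,
   PySem.List.sorted (stackUpd s t.1 t.2).2.2 (fun x => x))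

-- proof-side: the occurrence list of a flag, B's per-flag pair list, and the flat pair list
def occOf (ts : List (List String × List Int)) (f : List String) : List (List Int) :=
  (ts.filter (fun p => p.1 == f)).map Prod.snd

def pairsList (occ : List (List Int)) : List (List Int) :=
  (PySem.List.pyRange 1 (PySem.List.len occ) 2).map
    (fun k => PySem.List.pyGetD occ (k - 1) [] ++ PySem.List.pyGetD occ k [])

def pairsFlat (ts : List (List String × List Int)) : List (List Int) :=
  (PySem.Set.ofList (ts.map Prod.fst)).flatMap (fun f => pairsList (occOf ts f))

-- one tokenizer step from (c, ts) only appends to ts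
theorem stepTok_split (xs : List String) (c : Int) (ts : List (List String × List Int)) (i : Int) :
    stepTok xs (c, ts) i = ((stepTok xs (c, []) i).1, ts ++ (stepTok xs (c, []) i).2) := by
  unfold stepTok
  split_ifs <;> simp

-- the tokenizer appends: running it from (c, ts) appends its fresh tokens to ts
theorem tok_append (xs : List String) :
    ∀ (l : List Int) (c : Int) (ts : List (List String × List Int)),
      List.foldl (stepTok xs) (c, ts) l
        = ((List.foldl (stepTok xs) (c, []) l).1,
           ts ++ (List.foldl (stepTok xs) (c, []) l).2) := by
  intro l
  induction l with
  | nil => intro c ts; simp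
  | cons i l ih =>
    intro c ts
    rw [List.foldl_cons, List.foldl_cons, stepTok_split xs c ts i]
    rcases h : stepTok xs (c, []) i with ⟨c1, δ⟩
    rw [ih c1 (ts ++ δ), ih c1 δ]
    simp

-- head-step reduction lemmas for stepA and stepTok
theorem stepA_skip1 (xs : List String) (c : Int) (iss : List (List Int)) (fs : List (List String))
    (rings : List (List Int)) (i : Int) (ch : String) (h1 : i < c) :
    stepA xs (c, iss, fs, rings) (i, ch) = (c, iss, fs, rings) := by
  unfold stepA
  split_ifs with g1 g2 g3 g4 <;> first | rfl | exact absurd h1 g1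

theorem stepA_skip2 (xs : List String) (c : Int) (iss : List (List Int)) (fs : List (List String))
    (rings : List (List Int)) (i : Int) (ch : String) (h1 : ¬ i < c)
    (h2 : i < PySem.List.len xs - 1 ∧ PySem.List.pyGetD xs (i + 1) "" = "]") :
    stepA xs (c, iss, fs, rings) (i, ch) = (c, iss, fs, rings) := by
  unfold stepA
  split_ifs with g1 g2 g3 g4 <;> first | rfl | exact absurd g1 h1 | exact absurd h2 g2

theorem stepA_pct (xs : List String) (c : Int) (iss : List (List Int)) (fs : List (List String))
    (rings : List (List Int)) (i : Int) (ch : String) (h1 : ¬ i < c)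
    (h2 : ¬ (i < PySem.List.len xs - 1 ∧ PySem.List.pyGetD xs (i + 1) "" = "]"))
    (h3 : ch = "%") :
    stepA xs (c, iss, fs, rings) (i, ch)
      = (i + 3, pairStep (iss, fs, rings)
          (PySem.List.slice xs (some i) (some (i + 3)), [i, i + 1, i + 2])) := by
  unfold stepA
  split_ifs with g1 g2 g3 g4 <;>
    first | rfl | exact absurd g1 h1 | exact absurd g2 h2 | exact absurd h3 g3

theorem stepA_digit (xs : List String) (c : Int) (iss : List (List Int)) (fs : List (List String))
    (rings : List (List Int)) (i : Int) (ch : String) (h1 : ¬ i < c)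
    (h2 : ¬ (i < PySem.List.len xs - 1 ∧ PySem.List.pyGetD xs (i + 1) "" = "]"))
    (h3 : ¬ ch = "%") (h4 : ch ∈ numberList) :
    stepA xs (c, iss, fs, rings) (i, ch)
      = (i + 1, pairStep (iss, fs, rings)
          (PySem.List.slice xs (some i) (some (i + 1)), [i])) := by
  unfold stepA
  split_ifs with g1 g2 g3 g4 <;>
    first | rfl | exact absurd g1 h1 | exact absurd g2 h2 | exact absurd g3 h3 | exact absurd h4 g4

theorem stepA_other (xs : List String) (c : Int) (iss : List (List Int)) (fs : List (List String))
    (rings : List (List Int)) (i : Int) (ch : String) (h1 : ¬ i < c)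
    (h2 : ¬ (i < PySem.List.len xs - 1 ∧ PySem.List.pyGetD xs (i + 1) "" = "]"))
    (h3 : ¬ ch = "%") (h4 : ¬ ch ∈ numberList) :
    stepA xs (c, iss, fs, rings) (i, ch)
      = (i + 1, iss, fs, PySem.List.sorted rings (fun x => x)) := by
  unfold stepA
  split_ifs with g1 g2 g3 g4 <;>
    first | rfl | exact absurd g1 h1 | exact absurd g2 h2 | exact absurd g3 h3 | exact absurd g4 h4

theorem stepTok_skip1 (xs : List String) (c : Int) (ts : List (List String × List Int)) (i : Int)
    (h1 : i < c) : stepTok xs (c, ts) i = (c, ts) := by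
  unfold stepTok
  split_ifs with g1 g2 g3 g4 <;> first | rfl | exact absurd h1 g1

theorem stepTok_skip2 (xs : List String) (c : Int) (ts : List (List String × List Int)) (i : Int)
    (h1 : ¬ i < c) (h2 : i < PySem.List.len xs - 1 ∧ PySem.List.pyGetD xs (i + 1) "" = "]") :
    stepTok xs (c, ts) i = (c, ts) := by
  unfold stepTok
  split_ifs with g1 g2 g3 g4 <;> first | rfl | exact absurd g1 h1 | exact absurd h2 g2

theorem stepTok_pct (xs : List String) (c : Int) (ts : List (List String × List Int)) (i : Int)
    (h1 : ¬ i < c) (h2 : ¬ (i < PySem.List.len xs - 1 ∧ PySem.List.pyGetD xs (i + 1) "" = "]"))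
    (h3 : PySem.List.pyGetD xs i "" = "%") :
    stepTok xs (c, ts) i
      = (i + 3, ts ++ [(PySem.List.slice xs (some i) (some (i + 3)), [i, i + 1, i + 2])]) := by
  unfold stepTok
  split_ifs with g1 g2 g3 g4 <;>
    first | rfl | exact absurd g1 h1 | exact absurd g2 h2 | exact absurd h3 g3

theorem stepTok_digit (xs : List String) (c : Int) (ts : List (List String × List Int)) (i : Int)
    (h1 : ¬ i < c) (h2 : ¬ (i < PySem.List.len xs - 1 ∧ PySem.List.pyGetD xs (i + 1) "" = "]"))
    (h3 : ¬ PySem.List.pyGetD xs i "" = "%") (h4 : PySem.List.pyGetD xs i "" ∈ numberListB) :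
    stepTok xs (c, ts) i
      = (i + 1, ts ++ [(PySem.List.slice xs (some i) (some (i + 1)), [i])]) := by
  unfold stepTok
  split_ifs with g1 g2 g3 g4 <;>
    first | rfl | exact absurd g1 h1 | exact absurd g2 h2 | exact absurd g3 h3 | exact absurd h4 g4

theorem stepTok_other (xs : List String) (c : Int) (ts : List (List String × List Int)) (i : Int)
    (h1 : ¬ i < c) (h2 : ¬ (i < PySem.List.len xs - 1 ∧ PySem.List.pyGetD xs (i + 1) "" = "]"))
    (h3 : ¬ PySem.List.pyGetD xs i "" = "%") (h4 : ¬ PySem.List.pyGetD xs i "" ∈ numberListB) :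
    stepTok xs (c, ts) i = (i + 1, ts) := by
  unfold stepTok
  split_ifs with g1 g2 g3 g4 <;>
    first | rfl | exact absurd g1 h1 | exact absurd g2 h2 | exact absurd g3 h3 | exact absurd g4 h4

-- the rings component a pairStep produces is sorted
theorem pairStep_sorted (s : List (List Int) × List (List String) × List (List Int))
    (t : List String × List Int) :
    PySem.List.sorted (pairStep s t).2.2 (fun x => x) = (pairStep s t).2.2 := by
  show PySem.List.sorted (PySem.List.sorted _ _) _ = _
  exact sortedII_sorted _

-- A's scan = tokenize, then fold the token handler over the tokens
theorem scan_eq (xs : List String) (l : List Int) :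
    ∀ (c : Int) (iss : List (List Int)) (fs : List (List String)) (rings : List (List Int)),
      PySem.List.sorted rings (fun x => x) = rings →
      List.foldl (fun st j => stepA xs st (j, PySem.List.pyGetD xs j "")) (c, iss, fs, rings) l
        = ((List.foldl (stepTok xs) (c, []) l).1,
           List.foldl pairStep (iss, fs, rings) (List.foldl (stepTok xs) (c, []) l).2) := by
  induction l with
  | nil => intro c iss fs rings _; simp
  | cons i l ih =>
    intro c iss fs rings hs
    simp only [List.foldl_cons]
    by_cases h1 : i < c
    · rw [stepA_skip1 xs c iss fs rings i _ h1, stepTok_skip1 xs c [] i h1]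
      exact ih c iss fs rings hs
    · by_cases h2 : i < PySem.List.len xs - 1 ∧ PySem.List.pyGetD xs (i + 1) "" = "]"
      · rw [stepA_skip2 xs c iss fs rings i _ h1 h2, stepTok_skip2 xs c [] i h1 h2]
        exact ih c iss fs rings hs
      · by_cases h3 : PySem.List.pyGetD xs i "" = "%"
        · rw [stepA_pct xs c iss fs rings i _ h1 h2 h3, stepTok_pct xs c [] i h1 h2 h3]
          simp only [List.nil_append]
          rw [tok_append xs l (i + 3)
            [(PySem.List.slice xs (some i) (some (i + 3)), [i, i + 1, i + 2])]]
          rcases hp : pairStep (iss, fs, rings)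
              (PySem.List.slice xs (some i) (some (i + 3)), [i, i + 1, i + 2]) with ⟨is1, fs1, r1⟩
          have hs1 : PySem.List.sorted r1 (fun x => x) = r1 := by
            have := pairStep_sorted (iss, fs, rings)
              (PySem.List.slice xs (some i) (some (i + 3)), [i, i + 1, i + 2])
            rwa [hp] at this
          rw [ih (i + 3) is1 fs1 r1 hs1]
          simp [List.foldl_cons, hp]
        · by_cases h4 : PySem.List.pyGetD xs i "" ∈ numberList
          · rw [stepA_digit xs c iss fs rings i _ h1 h2 h3 h4,
              stepTok_digit xs c [] i h1 h2 h3 h4]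
            simp only [List.nil_append]
            rw [tok_append xs l (i + 1) [(PySem.List.slice xs (some i) (some (i + 1)), [i])]]
            rcases hp : pairStep (iss, fs, rings)
                (PySem.List.slice xs (some i) (some (i + 1)), [i]) with ⟨is1, fs1, r1⟩
            have hs1 : PySem.List.sorted r1 (fun x => x) = r1 := by
              have := pairStep_sorted (iss, fs, rings)
                (PySem.List.slice xs (some i) (some (i + 1)), [i])
              rwa [hp] at this
            rw [ih (i + 1) is1 fs1 r1 hs1]
            simp [List.foldl_cons, hp]
          · rw [stepA_other xs c iss fs rings i _ h1 h2 h3 h4,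
              stepTok_other xs c [] i h1 h2 h3 h4, hs]
            exact ih (i + 1) iss fs rings hs

-- occurrence-list facts
theorem occ_append_self (ts : List (List String × List Int)) (f : List String) (r : List Int) :
    occOf (ts ++ [(f, r)]) f = occOf ts f ++ [r] := by
  simp [occOf]

theorem occ_append_ne (ts : List (List String × List Int)) (f g : List String) (r : List Int)
    (h : g ≠ f) : occOf (ts ++ [(f, r)]) g = occOf ts g := by
  simp [occOf, List.filter_append]
  intro heq
  exact absurd heq.symm h

theorem occ_len (ts : List (List String × List Int)) (f : List String) :
    (occOf ts f).length = (ts.map Prod.fst).count f := by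
  simp only [occOf, List.count, List.countP_map, List.length_map]
  exact Eq.symm List.countP_eq_length_filter

theorem occ_nil_of_not_mem (ts : List (List String × List Int)) (f : List String)
    (h : ¬ f ∈ ts.map Prod.fst) : occOf ts f = [] := by
  have hc : (ts.map Prod.fst).count f = 0 := List.count_eq_zero.mpr h
  have hl := occ_len ts f
  rw [hc] at hl
  exact List.eq_nil_of_length_eq_zero hl

-- pairsList computed by two-at-a-time chunking
def chunkPairs : List (List Int) → List (List Int)
  | a :: b :: rest => (a ++ b) :: chunkPairs rest
  | _ => []

theorem pyRange_two (n : Nat) :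
    PySem.List.pyRange 1 (n : Int) 2
      = (List.range (n / 2)).map (fun k : Nat => (1 : Int) + 2 * (k : Int)) := by
  rw [PySem.List.pyRange_of_pos 1 n (by omega)]
  have hcnt : (if (1 : Int) < n then (((n : Int) - 1 + 2 - 1) / 2).toNat else 0) = n / 2 := by
    split_ifs with h
    · have he : ((n : Int) - 1 + 2 - 1) = (n : Int) := by ring
      rw [he]
      omega
    · omega
  rw [hcnt]

theorem pairsList_cons_cons (a b : List Int) (rest : List (List Int)) :
    pairsList (a :: b :: rest) = (a ++ b) :: pairsList rest := by
  have hlen : PySem.List.len (a :: b :: rest) = ((rest.length + 2 : Nat) : Int) := by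
    simp [PySem.List.len_eq]; push_cast; ring
  have hlen' : PySem.List.len rest = ((rest.length : Nat) : Int) := by
    simp [PySem.List.len_eq]
  rw [pairsList, pairsList, hlen, hlen', pyRange_two, pyRange_two]
  have hdiv : (rest.length + 2) / 2 = rest.length / 2 + 1 := by omega
  rw [hdiv, List.range_succ_eq_map, List.map_cons, List.map_cons, List.map_map, List.map_map,
    List.map_map]
  congr 1
  · have e0 : (1 : Int) + 2 * ((0 : Nat) : Int) - 1 = ((0 : Nat) : Int) := by norm_num
    have e1 : (1 : Int) + 2 * ((0 : Nat) : Int) = ((1 : Nat) : Int) := by norm_num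
    show PySem.List.pyGetD (a :: b :: rest) ((1 : Int) + 2 * ((0 : Nat) : Int) - 1) []
        ++ PySem.List.pyGetD (a :: b :: rest) ((1 : Int) + 2 * ((0 : Nat) : Int)) [] = a ++ b
    rw [e0, e1, PySem.List.pyGetD_natCast, PySem.List.pyGetD_natCast]
    simp
  · apply List.map_congr_left
    intro k _
    show PySem.List.pyGetD (a :: b :: rest) ((1 : Int) + 2 * ((Nat.succ k : Nat) : Int) - 1) []
        ++ PySem.List.pyGetD (a :: b :: rest) ((1 : Int) + 2 * ((Nat.succ k : Nat) : Int)) []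
      = PySem.List.pyGetD rest ((1 : Int) + 2 * ((k : Nat) : Int) - 1) []
        ++ PySem.List.pyGetD rest ((1 : Int) + 2 * ((k : Nat) : Int)) []
    have e1 : (1 : Int) + 2 * ((Nat.succ k : Nat) : Int) - 1 = ((2 * k + 2 : Nat) : Int) := by
      push_cast; ring
    have e2 : (1 : Int) + 2 * ((Nat.succ k : Nat) : Int) = ((2 * k + 3 : Nat) : Int) := by
      push_cast; ring
    have e3 : (1 : Int) + 2 * ((k : Nat) : Int) - 1 = ((2 * k : Nat) : Int) := by
      push_cast; ring
    have e4 : (1 : Int) + 2 * ((k : Nat) : Int) = ((2 * k + 1 : Nat) : Int) := by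
      push_cast; ring
    rw [e1, e2, e3, e4, PySem.List.pyGetD_natCast, PySem.List.pyGetD_natCast,
      PySem.List.pyGetD_natCast, PySem.List.pyGetD_natCast]
    have g1 : (a :: b :: rest).getD (2 * k + 2) [] = rest.getD (2 * k) [] := by
      simp [List.getD]
    have g2 : (a :: b :: rest).getD (2 * k + 3) [] = rest.getD (2 * k + 1) [] := by
      simp [List.getD]
    rw [g1, g2]

theorem pairsList_eq_chunk : ∀ (occ : List (List Int)), pairsList occ = chunkPairs occ
  | [] => by
    have h : chunkPairs [] = [] := rfl
    rw [h, pairsList]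
    have hl : PySem.List.len ([] : List (List Int)) = ((0 : Nat) : Int) := by simp
    rw [hl, pyRange_two]
    simp
  | [a] => by
    have h : chunkPairs [a] = [] := rfl
    rw [h, pairsList]
    have hl : PySem.List.len [a] = ((1 : Nat) : Int) := by simp
    rw [hl, pyRange_two]
    simp
  | a :: b :: rest => by
    have h : chunkPairs (a :: b :: rest) = (a ++ b) :: chunkPairs rest := rfl
    rw [h, pairsList_cons_cons, pairsList_eq_chunk rest]

theorem chunk_append (r : List Int) :
    ∀ (l : List (List Int)), chunkPairs (l ++ [r])
      = chunkPairs l ++ (if 2 ∣ l.length then [] else [(l.getLast?).getD [] ++ r])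
  | [] => by
    have h1 : chunkPairs [r] = [] := rfl
    have h0 : chunkPairs [] = [] := rfl
    simp [h1, h0]
  | [a] => by
    have h1 : chunkPairs [a, r] = [a ++ r] := rfl
    have h0 : chunkPairs [a] = [] := rfl
    simp [h1, h0]
  | a :: b :: rest => by
    have ih := chunk_append r rest
    have hc : ∀ (l : List (List Int)), chunkPairs (a :: b :: l) = (a ++ b) :: chunkPairs l :=
      fun _ => rfl
    show chunkPairs (a :: b :: (rest ++ [r])) = _
    rw [hc, ih, hc]
    by_cases hd : 2 ∣ rest.length
    · rw [if_pos hd, if_pos (show 2 ∣ (a :: b :: rest).length by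
        simp only [List.length_cons]; omega)]
      simp
    · rw [if_neg hd, if_neg (show ¬ 2 ∣ (a :: b :: rest).length by
        simp only [List.length_cons]; omega)]
      have hne : rest ≠ [] := by
        intro hnil
        rw [hnil] at hd
        exact hd ⟨0, rfl⟩
      have hlast : (a :: b :: rest).getLast? = rest.getLast? := by
        rcases List.exists_cons_of_ne_nil hne with ⟨x, xs, hx⟩
        rw [hx, List.getLast?_cons_cons, List.getLast?_cons_cons]
      rw [hlast]
      simp

theorem pairsList_append (occ : List (List Int)) (r : List Int) :
    pairsList (occ ++ [r])
      = pairsList occ ++ (if 2 ∣ occ.length then [] else [(occ.getLast?).getD [] ++ r]) := by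
  rw [pairsList_eq_chunk, pairsList_eq_chunk, chunk_append]

-- appending one token changes pairsFlat by at most one new pair (up to permutation)
theorem pairsFlat_append (ts : List (List String × List Int)) (f : List String) (r : List Int) :
    (pairsFlat (ts ++ [(f, r)])).Perm
      (pairsFlat ts ++ (if 2 ∣ (ts.map Prod.fst).count f then []
        else [((occOf ts f).getLast?).getD [] ++ r])) := by
  have hmapfst : (ts ++ [(f, r)]).map Prod.fst = ts.map Prod.fst ++ [f] := by simp
  rw [pairsFlat, pairsFlat, hmapfst, PySem.Set.ofList_append_singleton]
  by_cases hm : f ∈ ts.map Prod.fst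
  · have hmS : f ∈ PySem.Set.ofList (ts.map Prod.fst) :=
      (PySem.Set.mem_ofList _ _).mpr hm
    rw [PySem.Set.add_of_mem hmS]
    have hnd : (PySem.Set.ofList (ts.map Prod.fst)).Nodup := PySem.Set.nodup_ofList _
    obtain ⟨l1, l2, hS⟩ := List.append_of_mem hmS
    rw [hS] at hnd
    obtain ⟨-, hnd2, hdisj⟩ := List.nodup_append.mp hnd
    have hf1 : f ∉ l1 := fun hmem => hdisj f hmem f (by simp) rfl
    have hf2 : f ∉ l2 := (List.nodup_cons.mp hnd2).1
    have hgl1 : l1.flatMap (fun g => pairsList (occOf (ts ++ [(f, r)]) g))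
        = l1.flatMap (fun g => pairsList (occOf ts g)) :=
      List.flatMap_congr (fun x hx => by
        rw [occ_append_ne ts f x r (by rintro rfl; exact hf1 hx)])
    have hgl2 : l2.flatMap (fun g => pairsList (occOf (ts ++ [(f, r)]) g))
        = l2.flatMap (fun g => pairsList (occOf ts g)) :=
      List.flatMap_congr (fun x hx => by
        rw [occ_append_ne ts f x r (by rintro rfl; exact hf2 hx)])
    have hgf : pairsList (occOf (ts ++ [(f, r)]) f)
        = pairsList (occOf ts f) ++ (if 2 ∣ (ts.map Prod.fst).count f then []
            else [((occOf ts f).getLast?).getD [] ++ r]) := by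
      rw [occ_append_self, pairsList_append, occ_len]
    rw [hS, List.flatMap_append, List.flatMap_append, List.flatMap_cons, List.flatMap_cons,
      hgl1, hgl2, hgf]
    have key : ∀ (A Pf E B : List (List Int)),
        (A ++ ((Pf ++ E) ++ B)).Perm ((A ++ (Pf ++ B)) ++ E) := by
      intro A Pf E B
      have h1 : A ++ ((Pf ++ E) ++ B) = (A ++ Pf) ++ (E ++ B) := by simp [List.append_assoc]
      have h2 : (A ++ (Pf ++ B)) ++ E = (A ++ Pf) ++ (B ++ E) := by simp [List.append_assoc]
      rw [h1, h2]
      exact List.Perm.append_left _ List.perm_append_comm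
    exact key _ _ _ _
  · have hnot : ¬ f ∈ PySem.Set.ofList (ts.map Prod.fst) :=
      fun h => hm ((PySem.Set.mem_ofList _ _).mp h)
    rw [PySem.Set.add_of_not_mem hnot]
    have hcount : (ts.map Prod.fst).count f = 0 := List.count_eq_zero.mpr hm
    rw [hcount, if_pos ⟨0, rfl⟩]
    rw [List.flatMap_append, List.flatMap_cons, List.flatMap_nil]
    have hg : ∀ x ∈ PySem.Set.ofList (ts.map Prod.fst),
        pairsList (occOf (ts ++ [(f, r)]) x) = pairsList (occOf ts x) := fun x hx => by
      rw [occ_append_ne ts f x r (by rintro rfl; exact hm ((PySem.Set.mem_ofList _ _).mp hx))]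
    rw [List.flatMap_congr hg]
    have hoccf : occOf (ts ++ [(f, r)]) f = [r] := by
      rw [occ_append_self, occ_nil_of_not_mem ts f hm]
      rfl
    rw [hoccf]
    have hpr : pairsList [r] = [] := by rw [pairsList_eq_chunk]; rfl
    rw [hpr]
    simp

-- the stack-fold invariant: nodup flags, parity membership, lookup = last occurrence, sorted pairs
theorem pair_inv (ts : List (List String × List Int)) :
    (List.foldl pairStep ([], [], []) ts).2.1.Nodup ∧
    (∀ f, f ∈ (List.foldl pairStep ([], [], []) ts).2.1 ↔ ¬ (2 ∣ (ts.map Prod.fst).count f)) ∧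
    (List.foldl pairStep ([], [], []) ts).1
      = (List.foldl pairStep ([], [], []) ts).2.1.map
          (fun f => ((occOf ts f).getLast?).getD []) ∧
    (List.foldl pairStep ([], [], []) ts).2.2
      = PySem.List.sorted (pairsFlat ts) (fun x => x) := by
  induction ts using List.reverseRecOn with
  | nil =>
    refine ⟨by simp, ?_, by simp, by rfl⟩
    intro f
    simp
  | append_singleton ts t ih =>
    obtain ⟨ihnd, ihmem, ihmap, ihr⟩ := ih
    rcases t with ⟨f, r⟩
    simp only [List.foldl_append, List.foldl_cons, List.foldl_nil]
    set S := List.foldl pairStep ([], [], []) ts with hSdef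
    by_cases hf : f ∈ S.2.1
    · -- pop branch: the flag is on the stack; a pair is emitted
      have hsome : (PySem.List.index? S.2.1 f).isSome = true :=
        (PySem.List.index?_isSome_iff S.2.1 f).mpr hf
      obtain ⟨k, hk⟩ := Option.isSome_iff_exists.mp hsome
      obtain ⟨pre, suf, hfs, hklen, hfpre⟩ := (PySem.List.index?_eq_some_iff S.2.1 f k).mp hk
      have hndfs : (pre ++ f :: suf).Nodup := hfs ▸ ihnd
      obtain ⟨hndpre, hndcons, hdisj⟩ := List.nodup_append.mp hndfs
      have hfsuf : f ∉ suf := (List.nodup_cons.mp hndcons).1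
      have hstack : stackUpd S f r
          = (PySem.List.slice S.1 none (some ((k : Nat) : Int))
              ++ PySem.List.slice S.1 (some (((k : Nat) : Int) + 1)) none,
             PySem.List.slice S.2.1 none (some ((k : Nat) : Int))
              ++ PySem.List.slice S.2.1 (some (((k : Nat) : Int) + 1)) none,
             S.2.2 ++ [PySem.List.pyGetD S.1 ((k : Nat) : Int) [] ++ r]) := by
        simp only [stackUpd, if_pos hf, hk, Option.getD_some]
      have hcast : (((k : Nat) : Int) + 1) = (((k + 1 : Nat)) : Int) := by push_cast; ring
      have hmap' : S.1 = List.map (fun g => ((occOf ts g).getLast?).getD []) (pre ++ f :: suf) := by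
        rw [ihmap, hfs]
      have htakefs : S.2.1.take k = pre := by
        rw [hfs]; exact List.take_left' hklen
      have hdropfs : S.2.1.drop (k + 1) = suf := by
        rw [hfs, show pre ++ f :: suf = (pre ++ [f]) ++ suf by simp]
        exact List.drop_left' (by simp [hklen])
      have htakeis : S.1.take k = List.map (fun g => ((occOf ts g).getLast?).getD []) pre := by
        rw [hmap', List.map_append]; exact List.take_left' (by simp [hklen])
      have hdropis : S.1.drop (k + 1)
          = List.map (fun g => ((occOf ts g).getLast?).getD []) suf := by
        rw [hmap', show pre ++ f :: suf = (pre ++ [f]) ++ suf by simp, List.map_append]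
        exact List.drop_left' (by simp [hklen])
      have hidx : PySem.List.pyGetD S.1 ((k : Nat) : Int) [] = ((occOf ts f).getLast?).getD [] := by
        rw [PySem.List.pyGetD_natCast, hmap', List.map_append, List.map_cons]
        rw [show k = (List.map (fun g => ((occOf ts g).getLast?).getD []) pre).length by
          simp [hklen]]
        simp [List.getD_eq_getElem?_getD]
      have h21 : (pairStep S (f, r)).2.1 = pre ++ suf := by
        show (stackUpd S f r).2.1 = _
        rw [hstack]
        show PySem.List.slice S.2.1 none (some ((k : Nat) : Int))
            ++ PySem.List.slice S.2.1 (some (((k : Nat) : Int) + 1)) none = _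
        rw [PySem.List.slice_to_natCast, hcast, PySem.List.slice_from_natCast, htakefs, hdropfs]
      have h1 : (pairStep S (f, r)).1
          = List.map (fun g => ((occOf ts g).getLast?).getD []) pre
            ++ List.map (fun g => ((occOf ts g).getLast?).getD []) suf := by
        show (stackUpd S f r).1 = _
        rw [hstack]
        show PySem.List.slice S.1 none (some ((k : Nat) : Int))
            ++ PySem.List.slice S.1 (some (((k : Nat) : Int) + 1)) none = _
        rw [PySem.List.slice_to_natCast, hcast, PySem.List.slice_from_natCast, htakeis, hdropis]
      have h22 : (pairStep S (f, r)).2.2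
          = PySem.List.sorted (S.2.2 ++ [((occOf ts f).getLast?).getD [] ++ r]) (fun x => x) := by
        show PySem.List.sorted (stackUpd S f r).2.2 (fun x => x) = _
        rw [hstack, hidx]
      have hodd : ¬ 2 ∣ (ts.map Prod.fst).count f := (ihmem f).mp hf
      refine ⟨?_, ?_, ?_, ?_⟩
      · rw [h21]
        exact List.nodup_append.mpr ⟨hndpre, (List.nodup_cons.mp hndcons).2,
          fun a ha b hb => hdisj a ha b (List.mem_cons_of_mem f hb)⟩
      · intro g
        rw [h21]
        have hcnt : ((ts ++ [(f, r)]).map Prod.fst).count g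
            = (ts.map Prod.fst).count g + (if f = g then 1 else 0) := by
          simp [List.count_append, List.count_singleton, beq_iff_eq]
        rw [hcnt]
        by_cases hgf : g = f
        · subst hgf
          rw [if_pos rfl]
          simp only [List.mem_append]
          constructor
          · intro h
            rcases h with h | h
            · exact absurd h hfpre
            · exact absurd h hfsuf
          · intro h
            exact absurd (fun hd => h (by omega)) (not_not.mpr hodd)
        · rw [if_neg (fun he => hgf he.symm), Nat.add_zero]
          have hmemg : g ∈ pre ++ suf ↔ g ∈ S.2.1 := by
            rw [hfs]
            simp only [List.mem_append, List.mem_cons]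
            constructor
            · intro h; rcases h with h | h
              · exact Or.inl h
              · exact Or.inr (Or.inr h)
            · intro h; rcases h with h | h | h
              · exact Or.inl h
              · exact absurd h hgf
              · exact Or.inr h
          rw [hmemg]
          exact ihmem g
      · rw [h1, h21, List.map_append]
        have hpre : List.map (fun g => ((occOf ts g).getLast?).getD []) pre
            = List.map (fun g => ((occOf (ts ++ [(f, r)]) g).getLast?).getD []) pre :=
          List.map_congr_left (fun g hg => by
            rw [occ_append_ne ts f g r (by rintro rfl; exact hfpre hg)])
        have hsuf : List.map (fun g => ((occOf ts g).getLast?).getD []) suf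
            = List.map (fun g => ((occOf (ts ++ [(f, r)]) g).getLast?).getD []) suf :=
          List.map_congr_left (fun g hg => by
            rw [occ_append_ne ts f g r (by rintro rfl; exact hfsuf hg)])
        rw [hpre, hsuf]
      · rw [h22, ihr]
        have p1 : (PySem.List.sorted (pairsFlat ts) (fun x => x)
              ++ [((occOf ts f).getLast?).getD [] ++ r]).Perm
            (pairsFlat ts ++ [((occOf ts f).getLast?).getD [] ++ r]) :=
          (PySem.List.sorted_perm _ _ _).append_right _
        have p2 := pairsFlat_append ts f r
        rw [if_neg hodd] at p2
        exact sortedII_perm _ _ (p1.trans p2.symm)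
    · -- push branch: new flag goes on the stack, no pair is emitted
      have hstack : stackUpd S f r = (S.1 ++ [r], S.2.1 ++ [f], S.2.2) := by
        simp only [stackUpd, if_neg hf]
      have h21 : (pairStep S (f, r)).2.1 = S.2.1 ++ [f] := by
        show (stackUpd S f r).2.1 = _; rw [hstack]
      have h1 : (pairStep S (f, r)).1 = S.1 ++ [r] := by
        show (stackUpd S f r).1 = _; rw [hstack]
      have h22 : (pairStep S (f, r)).2.2 = PySem.List.sorted S.2.2 (fun x => x) := by
        show PySem.List.sorted (stackUpd S f r).2.2 (fun x => x) = _; rw [hstack]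
      have heven : 2 ∣ (ts.map Prod.fst).count f := by
        by_contra h
        exact hf ((ihmem f).mpr h)
      refine ⟨?_, ?_, ?_, ?_⟩
      · rw [h21]
        exact List.nodup_append.mpr ⟨ihnd, List.nodup_singleton f,
          fun a ha b hb => by
            rw [List.mem_singleton.mp hb]
            rintro rfl
            exact hf ha⟩
      · intro g
        rw [h21]
        have hcnt : ((ts ++ [(f, r)]).map Prod.fst).count g
            = (ts.map Prod.fst).count g + (if f = g then 1 else 0) := by
          simp [List.count_append, List.count_singleton, beq_iff_eq]
        rw [hcnt]
        by_cases hgf : g = f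
        · subst hgf
          rw [if_pos rfl]
          simp only [List.mem_append, List.mem_singleton]
          constructor
          · intro _ hd
            rcases heven with ⟨m, hm⟩
            omega
          · intro _
            exact Or.inr trivial
        · rw [if_neg (fun he => hgf he.symm), Nat.add_zero]
          simp only [List.mem_append, List.mem_singleton]
          constructor
          · intro h
            rcases h with h | h
            · exact (ihmem g).mp h
            · exact absurd h hgf
          · intro h
            exact Or.inl ((ihmem g).mpr h)
      · rw [h1, h21, List.map_append, ihmap]
        have hS1 : List.map (fun g => ((occOf ts g).getLast?).getD []) S.2.1
            = List.map (fun g => ((occOf (ts ++ [(f, r)]) g).getLast?).getD []) S.2.1 :=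
          List.map_congr_left (fun g hg => by
            rw [occ_append_ne ts f g r (by rintro rfl; exact hf hg)])
        have hr : [r] = List.map (fun g => ((occOf (ts ++ [(f, r)]) g).getLast?).getD []) [f] := by
          simp [occ_append_self, List.getLast?_concat]
        rw [hS1, ← hr]
      · rw [h22, ihr, sortedII_sorted]
        have p2 := pairsFlat_append ts f r
        rw [if_pos heven, List.append_nil] at p2
        exact sortedII_perm _ _ p2.symm

-- B's dict-group-pair pipeline computes sorted (pairsFlat tokens)
theorem alt_eq (xs : List String) :
    get_smiles_ring_alt xs
      = PySem.List.sorted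
          (pairsFlat ((List.foldl (stepTok xs) (0, [])
            (PySem.List.pyRange 0 (PySem.List.len xs) 1)).2)) (fun x => x) := by
  unfold get_smiles_ring_alt
  set toks := ((PySem.List.pyRange 0 (PySem.List.len xs) 1).foldl (stepTok xs) (0, [])).2 with htoks
  show PySem.List.sorted
      ((toks.foldl (fun d p => d.modify p.1 [] (fun cur => cur ++ [p.2]))
          PySem.Dict.empty).values.foldl
        (fun acc occ => (PySem.List.pyRange 1 (PySem.List.len occ) 2).foldl
          (fun acc k => acc ++ [PySem.List.pyGetD occ (k - 1) [] ++ PySem.List.pyGetD occ k []]) acc)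
        []) (fun x => x)
    = PySem.List.sorted (pairsFlat toks) (fun x => x)
  congr 1
  have hinner : ∀ (acc : List (List Int)) (occ : List (List Int)),
      (PySem.List.pyRange 1 (PySem.List.len occ) 2).foldl
        (fun acc k => acc ++ [PySem.List.pyGetD occ (k - 1) [] ++ PySem.List.pyGetD occ k []]) acc
        = acc ++ pairsList occ := by
    intro acc occ
    exact PySem.List.foldl_append_singleton_eq_map _ _ _
  set grp := toks.foldl (fun d p => d.modify p.1 [] (fun cur => cur ++ [p.2])) PySem.Dict.empty
    with hgrpdef
  have hnd : grp.keys.Nodup := by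
    exact PySem.Dict.nodup_keys_foldl_modify_key toks Prod.fst []
      (fun _ x cur => cur ++ [x.2]) PySem.Dict.empty (by simp)
  have hkeys : grp.keys = PySem.Set.ofList (toks.map Prod.fst) := by
    have h := PySem.Dict.keys_foldl_modify_key toks Prod.fst []
      (fun _ (x : List String × List Int) cur => cur ++ [x.2]) PySem.Dict.empty
    exact h.trans (by simp [PySem.Set.update_nil_left])
  have hget : ∀ f, grp.getD f [] = occOf toks f := by
    intro f
    have h := PySem.Dict.getD_foldl_modify_append toks PySem.Dict.empty f
    exact h.trans (by simp [occOf])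
  calc grp.values.foldl
        (fun acc occ => (PySem.List.pyRange 1 (PySem.List.len occ) 2).foldl
          (fun acc k => acc ++ [PySem.List.pyGetD occ (k - 1) [] ++ PySem.List.pyGetD occ k []]) acc) []
      = grp.values.foldl (fun acc occ => acc ++ pairsList occ) [] := by
        exact PySem.List.foldl_congr_mem _ _ _ _ (fun acc occ _ => hinner acc occ)
    _ = grp.values.flatMap pairsList := by
        rw [PySem.List.foldl_append_eq_flatMap]; simp
    _ = (grp.keys.map (fun k => grp.getD k [])).flatMap pairsList := by
        rw [PySem.Dict.values_eq_map_keys grp hnd []]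
    _ = pairsFlat toks := by
        rw [List.flatMap_map, hkeys, pairsFlat]
        simp only [hget]

-- ===== VERDICT (by name: the statement is the Claim_ definition above) =====
theorem get_smiles_ring_spec : Claim_equal_get_smiles_ring := by
  intro xs _
  show _ = _
  rw [get_smiles_ring, alt_eq]
  rw [PySem.List.enumerate_eq_map_pyRange (d := ""), List.foldl_map]
  rw [scan_eq xs _ 0 [] [] [] rfl]
  exact (pair_inv _).2.2.2
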